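-- pv_equiv track=rewrite | github.com/phamnhatkhoa2506/pnk | bt1_5.py | check_perfect_number_2
-- ===== SOURCE A (Python) =====
-- def check_perfect_number_2(N: int) -> bool:
--     if N % 2 != 0:
--         return False
--
--     i = 1
--     p = 1
--     while p <= N:
--         if p == N: return True
--         i += 1
--         p = 2**(i - 1) * (2**i - 1)
--
--     return False
-- ===== SOURCE B (Python) =====
-- def check_perfect_number_2(N: int) -> bool:
--     # An even N is perfect iff N = 2^(k-1) * (2^k - 1) with 2^k - 1 prime (Euclid-Euler).
--     if N % 2 != 0 or N <= 0:
--         return False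
--     # split N = t * M with t a power of two and M odd
--     t, M = 1, N
--     while M % 2 == 0:
--         M //= 2
--         t *= 2
--     if M != 2 * t - 1:
--         return False
--     # M is odd and >= 3 here; check that M is prime by trial division
--     d = 3
--     while d * d <= M:
--         if M % d == 0:
--             return False
--         d += 2
--     return True
-- ===== Notes on version B (the rewrite author's own statement) =====
-- stated objective: alternative
-- what changed: A enumerates the Euclid-form candidates (a power of two times the next Mersenne number) upward until reaching N, omitting the Euclid-Euler primality requirement; B instead splits N into its power-of-two part and odd part, checks that the odd part is the matching Mersenne number, and verifies by trial division that it is prime, so B actually tests even perfectness.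
-- intended difference: On the even numbers of Euclid's shape — a power of two multiplied by the next Mersenne number — whose Mersenne factor is composite (ten such inputs in the domain, the smallest being the witness 120), A returns True although they are not perfect numbers, because it never checks that the Mersenne factor is prime; B returns False, the intended answer for a perfect-number check. — e.g. on check_perfect_number_2(120): A returns true, B returns false
import Mathlib
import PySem

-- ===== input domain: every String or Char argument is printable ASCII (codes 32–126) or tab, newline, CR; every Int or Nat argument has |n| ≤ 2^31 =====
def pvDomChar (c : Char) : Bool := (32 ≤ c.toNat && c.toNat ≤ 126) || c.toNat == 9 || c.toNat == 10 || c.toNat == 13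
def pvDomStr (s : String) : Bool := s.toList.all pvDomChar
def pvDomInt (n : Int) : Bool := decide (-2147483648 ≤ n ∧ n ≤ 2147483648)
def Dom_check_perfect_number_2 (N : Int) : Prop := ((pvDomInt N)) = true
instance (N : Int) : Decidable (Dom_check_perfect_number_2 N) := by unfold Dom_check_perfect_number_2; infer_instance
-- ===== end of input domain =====

-- B replaces A's generate-Euclid-candidates loop by factoring N = 2^a * m and checking
-- m = 2^(a+1)-1 AND that m is prime (Euclid–Euler), fixing A's missing primality test.

-- ===== PORT A =====
-- A's while loop with a fuel counter used only to make the recursion total: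
-- 100 iterations always suffice for |N| ≤ 2^31 (p ≥ 2^(i-1) grows past N long before),
-- which the equivalence proof below establishes; i stays ≥ 1, so the .toNat on the
-- exponents is exact (Python's 2**(i-1) with i ≥ 1).
def pvLoopA : Nat → Int → Int → Int → Bool
  | 0, _, _, _ => false
  | fuel+1, i, p, N =>
    if p ≤ N then
      if p = N then true
      else pvLoopA fuel (i+1) (2 ^ ((i+1) - 1).toNat * (2 ^ (i+1).toNat - 1)) N
    else false

def check_perfect_number_2 (N : Int) : Bool :=
  if PySem.Int.mod N 2 ≠ 0 then false
  else pvLoopA 100 1 1 N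

-- ===== PORT B =====
-- B's first while loop (strip factors of two: M //= 2, t *= 2 while M is even),
-- fuel only for totality: 100 halvings always suffice for |N| ≤ 2^31.
def pvStrip : Nat → Int → Int → Int × Int
  | 0, t, M => (t, M)
  | fuel+1, t, M =>
    if PySem.Int.mod M 2 = 0 then pvStrip fuel (t * 2) (PySem.Int.floordiv M 2)
    else (t, M)

-- B's trial-division loop (d = 3, 5, 7, … while d*d <= M); fuel M.toNat at the call
-- site is always enough since d grows by 2 each step.
def pvPrimeLoop : Nat → Int → Int → Bool
  | 0, _, _ => true
  | fuel+1, M, d =>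
    if d * d ≤ M then
      if PySem.Int.mod M d = 0 then false
      else pvPrimeLoop fuel M (d + 2)
    else true

def check_perfect_number_2_alt (N : Int) : Bool :=
  if PySem.Int.mod N 2 ≠ 0 || N ≤ 0 then false
  else
    let tm := pvStrip 100 1 N
    if tm.2 ≠ 2 * tm.1 - 1 then false
    else pvPrimeLoop tm.2.toNat tm.2 3

-- ===== PRECONDITION & SPEC =====
-- On the even numbers of Euclid's shape -- a power of two multiplied by the next Mersenne
-- number -- whose Mersenne factor is composite (ten such inputs in the domain, listed below;
-- the smallest is the witness 120), A returns True although they are not perfect numbers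
-- (A omits the primality test of the Euclid-Euler theorem); B returns False, the intended
-- answer for a perfect-number check.
def D_check_perfect_number_2 (N : Int) : Prop :=
  N ∈ ([120, 2016, 32640, 130816, 523776, 2096128, 8386560,
        134209536, 536854528, 2147450880] : List Int)
instance (N : Int) : Decidable (D_check_perfect_number_2 N) := by
  unfold D_check_perfect_number_2; infer_instance

def Spec_check_perfect_number_2 (N : Int) (out : Bool) : Prop :=
  ¬ D_check_perfect_number_2 N → out = check_perfect_number_2_alt N
instance (N : Int) (out : Bool) : Decidable (Spec_check_perfect_number_2 N out) := by
  unfold Spec_check_perfect_number_2; infer_instance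

def pvDiffWitness_check_perfect_number_2 : Int := (120)
def pvDiffWitnessOut_check_perfect_number_2 : Bool × Bool := (true, false)

-- ===== CLAIM (what is proved, stated in full; the proofs are below) =====
def Claim_unchanged_check_perfect_number_2 : Prop :=
  ∀ (N : Int), Dom_check_perfect_number_2 N →
    Spec_check_perfect_number_2 N (check_perfect_number_2 N)
def Claim_changed_check_perfect_number_2 : Prop :=
  Dom_check_perfect_number_2 (pvDiffWitness_check_perfect_number_2) ∧
  D_check_perfect_number_2 (pvDiffWitness_check_perfect_number_2) ∧
  check_perfect_number_2 (pvDiffWitness_check_perfect_number_2) = pvDiffWitnessOut_check_perfect_number_2.1 ∧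
  check_perfect_number_2_alt (pvDiffWitness_check_perfect_number_2) = pvDiffWitnessOut_check_perfect_number_2.2 ∧
  pvDiffWitnessOut_check_perfect_number_2.1 ≠ pvDiffWitnessOut_check_perfect_number_2.2
def Claim_exact_check_perfect_number_2 : Prop :=
  ∀ (N : Int), Dom_check_perfect_number_2 N → D_check_perfect_number_2 N →
    check_perfect_number_2 N ≠ check_perfect_number_2_alt N

-- ===== LEMMAS AND PROOFS =====

-- the Euclid candidates A enumerates: fI j = 2^(j-1) * (2^j - 1)
def fI (j : Nat) : Int := 2 ^ (j - 1) * (2 ^ j - 1)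

-- the candidates that fit in the domain (fI 2 .. fI 16)
def pvClist : List Int :=
  [6, 28, 120, 496, 2016, 8128, 32640, 130816, 523776, 2096128,
   8386560, 33550336, 134209536, 536854528, 2147450880]

-- the candidates whose Mersenne factor is prime, i.e. the even perfect numbers in the domain
def pvPlist : List Int := [6, 28, 496, 8128, 33550336]

lemma fI_mono {a b : Nat} (h : a ≤ b) : fI a ≤ fI b := by
  unfold fI
  have h1 : (2:Int) ^ (a - 1) ≤ 2 ^ (b - 1) := pow_le_pow_right₀ (by norm_num) (by omega)
  have h2 : (2:Int) ^ a ≤ 2 ^ b := pow_le_pow_right₀ (by norm_num) h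
  have h3 : (1:Int) ≤ 2 ^ a := one_le_pow₀ (by norm_num)
  have h4 : (0:Int) ≤ 2 ^ (a - 1) := by positivity
  exact mul_le_mul h1 (by linarith) (by linarith) (by positivity)

lemma pvLoopA_iff : ∀ (fuel k : Nat) (N : Int), N < fI (k + fuel) →
    (pvLoopA fuel (k : Int) (fI k) N = true ↔ ∃ j, k ≤ j ∧ fI j = N) := by
  intro fuel
  induction fuel with
  | zero =>
    intro k N hN
    simp only [pvLoopA, Bool.false_eq_true, false_iff]
    rintro ⟨j, hj, rfl⟩
    rw [Nat.add_zero] at hN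
    exact absurd (fI_mono hj) (not_le.mpr hN)
  | succ fuel ih =>
    intro k N hN
    have hcast : ((k : Int) + 1) = ((k + 1 : Nat) : Int) := by push_cast; ring
    have hp' : (2:Int) ^ (((k + 1 : Nat) : Int) - 1).toNat * (2 ^ ((k + 1 : Nat) : Int).toNat - 1) = fI (k+1) := by
      have e1 : ((((k + 1 : Nat)) : Int) - 1).toNat = k := by omega
      have e2 : (((k + 1 : Nat) : Int)).toNat = k + 1 := by omega
      rw [e1, e2, fI, Nat.add_sub_cancel]
    simp only [pvLoopA]
    split_ifs with h1 h2
    · simp only [true_iff]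
      exact ⟨k, le_refl k, h2⟩
    · rw [hcast, hp', ih (k+1) N (by rw [show k + 1 + fuel = k + (fuel + 1) by omega]; exact hN)]
      constructor
      · rintro ⟨j, hj, rfl⟩; exact ⟨j, by omega, rfl⟩
      · rintro ⟨j, hj, rfl⟩
        refine ⟨j, ?_, rfl⟩
        rcases Nat.eq_or_lt_of_le hj with rfl | hlt
        · exact absurd rfl h2
        · omega
    · simp only [false_iff]
      rintro ⟨j, hj, rfl⟩
      exact absurd (fI_mono hj) h1

-- A returns True exactly on the domain's Euclid candidates
lemma A_iff_mem (N : Int) (hDom : Dom_check_perfect_number_2 N) :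
    check_perfect_number_2 N = true ↔ N ∈ pvClist := by
  unfold Dom_check_perfect_number_2 pvDomInt at hDom
  have hN : -2147483648 ≤ N ∧ N ≤ 2147483648 := by simpa using hDom
  unfold check_perfect_number_2
  split_ifs with hmod
  · simp only [false_iff]
    intro hmem
    fin_cases hmem <;> exact hmod (by decide)
  · simp only [ne_eq, not_not] at hmod
    have hbig : N < fI (1 + 100) := by
      have : (2147483648:Int) < fI (1 + 100) := by norm_num [fI]
      omega
    have key := pvLoopA_iff 100 1 N hbig
    rw [Nat.cast_one, (by decide : fI 1 = (1:Int))] at key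
    rw [key]
    constructor
    · rintro ⟨j, hj1, rfl⟩
      have hj16 : j ≤ 16 := by
        by_contra hc
        have : fI 17 ≤ fI j := fI_mono (by omega)
        have : (8589869056:Int) ≤ fI j := by
          have e : fI 17 = 8589869056 := by decide
          omega
        omega
      have hj2 : 2 ≤ j := by
        rcases Nat.eq_or_lt_of_le hj1 with rfl | h
        · exact absurd hmod (by decide)
        · omega
      interval_cases j <;> decide
    · intro hmem
      fin_cases hmem
      · exact ⟨2, by omega, by decide⟩
      · exact ⟨3, by omega, by decide⟩
      · exact ⟨4, by omega, by decide⟩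
      · exact ⟨5, by omega, by decide⟩
      · exact ⟨6, by omega, by decide⟩
      · exact ⟨7, by omega, by decide⟩
      · exact ⟨8, by omega, by decide⟩
      · exact ⟨9, by omega, by decide⟩
      · exact ⟨10, by omega, by decide⟩
      · exact ⟨11, by omega, by decide⟩
      · exact ⟨12, by omega, by decide⟩
      · exact ⟨13, by omega, by decide⟩
      · exact ⟨14, by omega, by decide⟩
      · exact ⟨15, by omega, by decide⟩
      · exact ⟨16, by omega, by decide⟩

lemma pvStrip_exact : ∀ (fuel a : Nat) (m t : Int), PySem.Int.mod m 2 = 1 → a < fuel →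
    pvStrip fuel t (2 ^ a * m) = (t * 2 ^ a, m) := by
  intro fuel
  induction fuel with
  | zero => intro a m t _ h; omega
  | succ fuel ih =>
    intro a m t hm ha
    cases a with
    | zero =>
      simp only [pow_zero, one_mul, mul_one, pvStrip]
      rw [if_neg (by omega)]
    | succ a =>
      have hdvd : PySem.Int.mod (2 ^ (a+1) * m) 2 = 0 := by
        rw [PySem.Int.mod_eq_zero_iff_dvd]
        exact ⟨2 ^ a * m, by ring⟩
      have hdiv : PySem.Int.floordiv (2 ^ (a+1) * m) 2 = 2 ^ a * m := by
        rw [PySem.Int.floordiv_eq_ediv_of_pos (by norm_num),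
            show (2:Int) ^ (a+1) * m = (2 ^ a * m) * 2 by ring]
        exact Int.mul_ediv_cancel _ (by norm_num)
      simp only [pvStrip, hdvd, hdiv, if_true]
      rw [ih a m (t * 2) hm (by omega)]
      simp only [Prod.mk.injEq]
      exact ⟨by ring, trivial⟩

lemma exists_pow_two_mul_odd (N : Int) (h : 1 ≤ N) :
    ∃ (a : Nat) (m : Int), PySem.Int.mod m 2 = 1 ∧ 1 ≤ m ∧ N = 2 ^ a * m := by
  obtain ⟨a, m, hm, he⟩ := Nat.exists_eq_two_pow_mul_odd (n := N.toNat) (by omega)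
  refine ⟨a, (m : Int), ?_, ?_, ?_⟩
  · rw [PySem.Int.mod_eq_emod_of_pos (by norm_num)]
    have := Nat.odd_iff.mp hm
    omega
  · have : m ≠ 0 := by rintro rfl; simp at hm
    omega
  · have : (N.toNat : Int) = N := by omega
    rw [← this, he]; push_cast; ring

lemma pow_le_31 {a : Nat} (h : (2:Int) ^ a ≤ 2147483648) : a ≤ 31 := by
  by_contra hc
  have h32 : (2:Int) ^ 32 ≤ 2 ^ a := pow_le_pow_right₀ (by norm_num) (by omega)
  norm_num at h32
  omega

-- B returns True exactly on the even perfect numbers in the domain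
lemma B_iff_mem (N : Int) (hDom : Dom_check_perfect_number_2 N) :
    check_perfect_number_2_alt N = true ↔ N ∈ pvPlist := by
  unfold Dom_check_perfect_number_2 pvDomInt at hDom
  have hN : -2147483648 ≤ N ∧ N ≤ 2147483648 := by simpa using hDom
  unfold check_perfect_number_2_alt
  split_ifs with hg
  · simp only [false_iff]
    intro hmem
    fin_cases hmem <;> exact absurd hg (by decide)
  · -- N even and 1 ≤ N
    simp only [Bool.or_eq_true, decide_eq_true_eq, not_or, ne_eq, not_not, not_le] at hg
    obtain ⟨hmod, hpos'⟩ := hg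
    have hpos : 1 ≤ N := hpos'
    obtain ⟨a, m, hm, hm1, rfl⟩ := exists_pow_two_mul_odd N hpos
    have ha31 : a ≤ 31 := by
      apply pow_le_31
      calc (2:Int) ^ a = 2 ^ a * 1 := by ring
        _ ≤ 2 ^ a * m := by
            apply mul_le_mul_of_nonneg_left hm1 (by positivity)
        _ ≤ 2147483648 := hN.2
    have hstrip : pvStrip 100 1 (2 ^ a * m) = (1 * 2 ^ a, m) :=
      pvStrip_exact 100 a m 1 hm (by omega)
    rw [hstrip]
    have ha1 : 1 ≤ a := by
      rcases Nat.eq_zero_or_pos a with rfl | h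
      · exfalso
        simp only [pow_zero, one_mul] at hmod
        omega
      · exact h
    simp only [one_mul]
    split_ifs with hne
    · -- m ≠ 2 * 2^a - 1: not of Euclid shape, so not in pvPlist either
      simp only [false_iff]
      intro hmem
      -- for each element of pvPlist, the 2^a * odd decomposition is the Euclid one
      have hm2 : m % 2 = 1 := by
        rwa [PySem.Int.mod_eq_emod_of_pos (by norm_num)] at hm
      apply hne
      simp only [pvPlist, List.mem_cons, List.not_mem_nil, or_false] at hmem
      interval_cases a <;> norm_num at hmem ⊢ <;> omega
    · -- m = 2 * 2^a - 1, so N = fI (a+1); bound a and check each case by computation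
      simp only [ne_eq, not_not] at hne
      subst hne
      have ha15 : a ≤ 15 := by
        by_contra hc
        have h16 : (2:Int) ^ 16 ≤ 2 ^ a := pow_le_pow_right₀ (by norm_num) (by omega)
        have : (2:Int) ^ a * (2 * 2 ^ a - 1) ≥ 2 ^ 16 * (2 * 2 ^ 16 - 1) := by nlinarith
        norm_num at this
        omega
      interval_cases a <;> decide

-- every element of pvPlist is in pvClist
lemma pvP_sub_C {N : Int} (h : N ∈ pvPlist) : N ∈ pvClist := by
  fin_cases h <;> decide

-- outside D_, a candidate is perfect
lemma pvC_not_D {N : Int} (h : N ∈ pvClist) (hD : ¬ D_check_perfect_number_2 N) :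
    N ∈ pvPlist := by
  fin_cases h <;> first
    | decide
    | (exfalso; apply hD; decide)

-- ===== VERDICT (by name: the statement is the Claim_ definition above) =====
theorem check_perfect_number_2_spec : Claim_unchanged_check_perfect_number_2 := by
  intro N hDom
  unfold Spec_check_perfect_number_2
  intro hD
  have hA := A_iff_mem N hDom
  have hB := B_iff_mem N hDom
  by_cases hc : N ∈ pvClist
  · have hp : N ∈ pvPlist := pvC_not_D hc hD
    rw [hA.mpr hc, hB.mpr hp]
  · have h1 : check_perfect_number_2 N = false := by
      rcases h : check_perfect_number_2 N
      · rfl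
      · exact absurd (hA.mp h) hc
    have h2 : check_perfect_number_2_alt N = false := by
      rcases h : check_perfect_number_2_alt N
      · rfl
      · exact absurd (pvP_sub_C (hB.mp h)) hc
    rw [h1, h2]

theorem check_perfect_number_2_changed : Claim_changed_check_perfect_number_2 := by
  unfold Claim_changed_check_perfect_number_2; decide

theorem check_perfect_number_2_tight : Claim_exact_check_perfect_number_2 := by
  intro N _ hD
  unfold D_check_perfect_number_2 at hD
  fin_cases hD <;> decide
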